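-- pv_equiv track=rewrite | github.com/ajai-sharma-backup/hog | pascal.py | generalized_pascal
-- ===== SOURCE A (Python) =====
-- def generalized_pascal(n, rows):
--     '''
--     Generates n rows of a generalized pascal's triangle with
--     first row n long. Each entry is the sum of n entries above it.
--     The entries relate to the probability of rolling a number in hog.
--     '''
--     def get_entry(row, index):
--         '''Returns the entry for indices 0<=index<=len, and 0 for other numbers.'''
--         try:
--             if index < 0:
--                 raise ValueError
--             else:
--                 return row[index]
--         except:
--             return 0
--     def get_next_row(row, n=n):
--         new_row = []
--         for i in range(len(row) + n - 1):
--             new_entry = sum([get_entry(row, i - k) for k in range(n)])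
--             new_row.append(new_entry)
--         return new_row
--
--     triangle = [[1] * n]
--     for i in range(rows-1):
--         triangle.append(get_next_row(triangle[-1]))
--
--     return triangle
-- ===== SOURCE B (Python) =====
-- def generalized_pascal(n, rows):
--     '''Sliding-window running sum: each next-row entry updates the previous
--     sum in O(1) instead of re-summing n entries.'''
--     triangle = [[1] * n]
--     for _ in range(rows - 1):
--         prev = triangle[-1]
--         m = len(prev) + n - 1
--         new_row = []
--         s = 0
--         for i in range(m):
--             if i < len(prev):
--                 s += prev[i]
--             if i - n >= 0:
--                 s -= prev[i - n]
--             new_row.append(s)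
--         triangle.append(new_row)
--     return triangle
-- ===== Notes on version B (the rewrite author's own statement) =====
-- stated objective: faster
-- what changed: Each entry of the next row is obtained by updating a sliding-window running sum in O(1) (add the element entering the window, subtract the one leaving) instead of re-summing n entries per position; intended as faster (O(rows^2) vs O(rows^2*n)); a timing run measured B 17.96x at the largest size both finished (n=16), but could not confirm the label at n=64 where both hit the budget.
import Mathlib
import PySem

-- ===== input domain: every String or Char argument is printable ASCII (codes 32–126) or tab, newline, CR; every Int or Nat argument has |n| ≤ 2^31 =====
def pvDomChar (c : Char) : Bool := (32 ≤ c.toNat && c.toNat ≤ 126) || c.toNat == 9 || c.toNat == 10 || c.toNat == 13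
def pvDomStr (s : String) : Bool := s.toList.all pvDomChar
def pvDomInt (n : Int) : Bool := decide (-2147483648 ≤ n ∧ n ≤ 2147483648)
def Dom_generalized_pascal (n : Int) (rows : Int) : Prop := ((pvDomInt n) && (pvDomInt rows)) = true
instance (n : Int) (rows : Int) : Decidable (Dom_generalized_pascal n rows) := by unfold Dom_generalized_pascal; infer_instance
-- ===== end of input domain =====

-- B replaces the per-entry re-summation of n elements by a sliding-window running sum: intended as faster; a timing run measured B 17.96x at the largest size both programs finished.

-- ===== PORT A =====
-- get_entry(row, index)
def pvGetEntry (row : List Int) (index : Int) : Int :=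
  if index < 0 then 0 else (PySem.List.pyGet? row index).getD 0

-- get_next_row(row, n)
def pvNextRow (row : List Int) (n : Int) : List Int :=
  (PySem.List.pyRange 0 (PySem.List.len row + n - 1) 1).foldl
    (fun new_row i =>
      new_row ++ [((PySem.List.pyRange 0 n 1).map (fun k => pvGetEntry row (i - k))).sum])
    []

def generalized_pascal (n : Int) (rows : Int) : List (List Int) :=
  (PySem.List.pyRange 0 (rows - 1) 1).foldl
    (fun triangle _ => triangle ++ [pvNextRow (PySem.List.pyGetD triangle (-1) []) n])
    [List.replicate n.toNat 1]

-- ===== PORT B =====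
-- the body of B's inner loop; the guards keep every index in range, so pyGetD is exact
def pvAltStep (prev : List Int) (n : Int) (st : Int × List Int) (i : Int) : Int × List Int :=
  let s1 := if i < PySem.List.len prev then st.1 + PySem.List.pyGetD prev i 0 else st.1
  let s2 := if 0 ≤ i - n then s1 - PySem.List.pyGetD prev (i - n) 0 else s1
  (s2, st.2 ++ [s2])

def pvAltRow (prev : List Int) (n : Int) : List Int :=
  ((PySem.List.pyRange 0 (PySem.List.len prev + n - 1) 1).foldl (pvAltStep prev n) (0, [])).2

def generalized_pascal_alt (n : Int) (rows : Int) : List (List Int) :=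
  (PySem.List.pyRange 0 (rows - 1) 1).foldl
    (fun triangle _ => triangle ++ [pvAltRow (PySem.List.pyGetD triangle (-1) []) n])
    [List.replicate n.toNat 1]

-- ===== PRECONDITION & SPEC =====
def Spec_generalized_pascal (n : Int) (rows : Int) (out : List (List Int)) : Prop := out = generalized_pascal_alt n rows
instance (n : Int) (rows : Int) (out : List (List Int)) : Decidable (Spec_generalized_pascal n rows out) := by unfold Spec_generalized_pascal; infer_instance

-- ===== CLAIM (what is proved, stated in full; the proofs are below) =====
def Claim_equal_generalized_pascal : Prop := ∀ (n : Int) (rows : Int), Dom_generalized_pascal n rows → Spec_generalized_pascal n rows (generalized_pascal n rows)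

-- ===== LEMMAS AND PROOFS =====

-- the window sum A computes at position i
def pvS (prev : List Int) (n i : Int) : Int :=
  ((PySem.List.pyRange 0 n 1).map (fun k => pvGetEntry prev (i - k))).sum

-- Nat-indexed form of the window sum
def pvT (prev : List Int) (N : Nat) (i : Int) : Int :=
  ((List.range N).map (fun (k : Nat) => pvGetEntry prev (i - (k : Int)))).sum

lemma pvS_eq_pvT (prev : List Int) (n i : Int) :
    pvS prev n i = pvT prev n.toNat i := by
  unfold pvS pvT
  rw [PySem.List.pyRange_one, List.map_map]
  simp [Function.comp_def]

lemma pvT_step (prev : List Int) (N : Nat) (i : Int) :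
    pvT prev N i = pvT prev N (i - 1) + pvGetEntry prev i - pvGetEntry prev (i - N) := by
  induction N generalizing i with
  | zero => unfold pvT; simp
  | succ N ih =>
    unfold pvT
    rw [List.range_succ]
    simp only [List.map_append, List.sum_append, List.map_cons, List.map_nil, List.sum_cons,
      List.sum_nil]
    have h1 : pvT prev N i = pvT prev N (i - 1) + pvGetEntry prev i - pvGetEntry prev (i - N) :=
      ih i
    unfold pvT at h1
    have : i - 1 - (N : Int) = i - ((N : Nat) + 1 : Nat) := by push_cast; ring
    rw [← this]
    omega

lemma pvS_step (prev : List Int) (n i : Int) (hn : 0 ≤ n) :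
    pvS prev n i = pvS prev n (i - 1) + pvGetEntry prev i - pvGetEntry prev (i - n) := by
  rw [pvS_eq_pvT prev n i, pvS_eq_pvT prev n (i - 1), pvT_step]
  have : i - (n.toNat : Int) = i - n := by omega
  rw [this]

lemma pvS_neg_one (prev : List Int) (n : Int) : pvS prev n (-1) = 0 := by
  unfold pvS
  apply List.sum_eq_zero
  intro x hx
  simp only [List.mem_map] at hx
  obtain ⟨k, hk, rfl⟩ := hx
  rw [PySem.List.mem_pyRange_one] at hk
  simp [pvGetEntry, show (-1 : Int) - k < 0 by omega]

lemma pvGetEntry_lt (prev : List Int) (i : Int) (h0 : 0 ≤ i) :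
    pvGetEntry prev i = PySem.List.pyGetD prev i 0 := by
  unfold pvGetEntry
  rw [if_neg (by omega)]
  simp [PySem.List.pyGet?, PySem.List.pyGetD, PySem.List.pyIdx?]

lemma pvGetEntry_ge (prev : List Int) (i : Int) (h1 : (prev.length : Int) ≤ i) :
    pvGetEntry prev i = 0 := by
  unfold pvGetEntry
  rw [if_neg (by omega)]
  have : PySem.List.pyGet? prev i = none := by
    rw [PySem.List.pyGet?_eq_none_iff]
    unfold PySem.Raise.InRange
    omega
  rw [this]
  rfl

-- B's step computes A's window sum, for positions inside the loop range
lemma pvAltStep_eq (prev : List Int) (n i : Int) (hn : 0 ≤ n) (h0 : 0 ≤ i)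
    (_h1 : i < PySem.List.len prev + n - 1) (acc : List Int) :
    pvAltStep prev n (pvS prev n (i - 1), acc) i = (pvS prev n i, acc ++ [pvS prev n i]) := by
  have hlen : PySem.List.len prev = (prev.length : Int) := PySem.List.len_eq prev
  have hEi : pvGetEntry prev i = if i < PySem.List.len prev then PySem.List.pyGetD prev i 0 else 0 := by
    split_ifs with h
    · exact pvGetEntry_lt prev i h0
    · exact pvGetEntry_ge prev i (by omega)
  have hEin : pvGetEntry prev (i - n) = if 0 ≤ i - n then PySem.List.pyGetD prev (i - n) 0 else 0 := by
    split_ifs with h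
    · exact pvGetEntry_lt prev (i - n) h
    · simp [pvGetEntry, show i - n < 0 by omega]
  have hstep := pvS_step prev n i hn
  unfold pvAltStep
  simp only []
  split_ifs with hlt hge hge <;>
    simp only [hEi, if_pos, hlt, hEin, hge] at hstep <;> simp_all

-- the invariant of B's inner loop
lemma pvAlt_inv (prev : List Int) (n : Int) (hn : 0 ≤ n) (j : Nat) :
    ∀ (a : Int) (acc : List Int), 0 ≤ a → a + j ≤ PySem.List.len prev + n - 1 →
    (PySem.List.pyRange a (a + j) 1).foldl (pvAltStep prev n) (pvS prev n (a - 1), acc)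
      = (pvS prev n (a + j - 1),
         acc ++ (PySem.List.pyRange a (a + j) 1).map (pvS prev n)) := by
  induction j with
  | zero =>
    intro a acc _ _
    rw [show a + (0 : Nat) = a by omega, PySem.List.pyRange_one_eq_nil (le_refl a)]
    simp
  | succ j ih =>
    intro a acc ha hub
    have hcons := PySem.List.pyRange_one_cons (a := a) (b := a + ((j : Int) + 1)) (by omega)
    rw [show a + ((j + 1 : Nat) : Int) = a + ((j : Int) + 1) by push_cast; ring, hcons]
    simp only [List.foldl_cons, List.map_cons]
    rw [pvAltStep_eq prev n a hn ha (by omega) acc]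
    have := ih (a + 1) (acc ++ [pvS prev n a]) (by omega) (by push_cast at hub ⊢; omega)
    rw [show a + 1 - 1 = a by ring] at this
    rw [show a + 1 + (j : Int) = a + ((j : Int) + 1) by ring] at this
    rw [this]
    simp [show a + ((j : Int) + 1) - 1 = a + (j : Int) by ring]

-- for nonnegative n the two row computations agree on every row
lemma pvRow_eq (prev : List Int) (n : Int) (hn : 0 ≤ n) :
    pvAltRow prev n = pvNextRow prev n := by
  unfold pvAltRow pvNextRow
  have hm : PySem.List.len prev + n - 1 = PySem.List.len prev + n - 1 := rfl
  by_cases hpos : 0 < PySem.List.len prev + n - 1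
  · have h0 : (0 : Int) ≤ 0 := le_refl 0
    have := pvAlt_inv prev n hn (PySem.List.len prev + n - 1).toNat 0 [] h0 (by omega)
    rw [show (0 : Int) + ((PySem.List.len prev + n - 1).toNat : Int) = PySem.List.len prev + n - 1 by omega] at this
    rw [show (0 : Int) - 1 = -1 by ring, pvS_neg_one] at this
    rw [this]
    simp only [List.nil_append]
    rw [PySem.List.foldl_append_singleton_eq_map]
    simp [pvS]
  · rw [PySem.List.pyRange_one_eq_nil (by omega)]
    simp

-- two appended-row folds agree when both appended rows are always empty
lemma pvFold_nil (f g : List Int → List Int) (hf : f [] = []) (hg : g [] = []) :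
    ∀ (l : List Int) (tri : List (List Int)), PySem.List.pyGetD tri (-1) [] = [] →
    l.foldl (fun t _ => t ++ [f (PySem.List.pyGetD t (-1) [])]) tri
      = l.foldl (fun t _ => t ++ [g (PySem.List.pyGetD t (-1) [])]) tri := by
  intro l
  induction l with
  | nil => intro tri _; rfl
  | cons x xs ih =>
    intro tri h
    simp only [List.foldl_cons, h, hf, hg]
    exact ih (tri ++ [[]]) (PySem.List.pyGetD_neg_one_append_singleton tri [] [])

-- ===== VERDICT (by name: the statement is the Claim_ definition above) =====
theorem generalized_pascal_spec : Claim_equal_generalized_pascal := by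
  intro n rows _
  unfold Spec_generalized_pascal generalized_pascal generalized_pascal_alt
  by_cases hn : 0 ≤ n
  · have : (fun (triangle : List (List Int)) (_ : Int) =>
        triangle ++ [pvNextRow (PySem.List.pyGetD triangle (-1) []) n])
      = (fun (triangle : List (List Int)) (_ : Int) =>
        triangle ++ [pvAltRow (PySem.List.pyGetD triangle (-1) []) n]) := by
      funext t i
      rw [pvRow_eq _ n hn]
    rw [this]
  · have hrep : List.replicate n.toNat (1 : Int) = [] := by
      rw [Int.toNat_of_nonpos (by omega)]; rfl
    have hf : pvNextRow [] n = [] := by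
      unfold pvNextRow
      rw [show PySem.List.len ([] : List Int) + n - 1 = n - 1 by simp [PySem.List.len_eq],
        PySem.List.pyRange_one_eq_nil (a := 0) (b := n - 1) (by omega)]
      rfl
    have hg : pvAltRow [] n = [] := by
      unfold pvAltRow
      rw [show PySem.List.len ([] : List Int) + n - 1 = n - 1 by simp [PySem.List.len_eq],
        PySem.List.pyRange_one_eq_nil (a := 0) (b := n - 1) (by omega)]
      rfl
    rw [hrep]
    exact pvFold_nil (fun r => pvNextRow r n) (fun r => pvAltRow r n) hf hg _ [[]] (by decide)
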